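-- pv_equiv track=rewrite | github.com/kaluginpeter/Algorithms_and_structures_tasks | CodeWars/7kyu/How_Many_Lonely_Letters.py | count_lonely_letters
-- ===== SOURCE A (Python) =====
-- def count_lonely_letters(text):
--     text = text.lower()
--     output: int = 0
--     hashmap: dict[str, int] = dict()
--     for char in text:
--         hashmap[char] = hashmap.get(char, 0) + 1
--     for i in range(len(text)):
--         if hashmap[text[i]] > 1 or not (ord('a') <= ord(text[i]) <= ord('z')): continue
--         left: bool = hashmap.get(chr(ord(text[i]) - 1) if text[i] != 'a' else '', 0)
--         right: bool = False if text[i] == 'z' else hashmap.get(chr(ord(text[i]) + 1), 0)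
--         if not left and not right: output += 1
--     return output
-- ===== SOURCE B (Python) =====
-- def count_lonely_letters(text):
--     s = sorted(text.lower())
--     n = len(s)
--     total = 0
--     prev = None
--     i = 0
--     while i < n:
--         c = s[i]
--         j = i + 1
--         while j < n and s[j] == c:
--             j += 1
--         nxt = s[j] if j < n else None
--         if j - i == 1 and 'a' <= c <= 'z' and (c == 'a' or prev != chr(ord(c) - 1)) and (c == 'z' or nxt != chr(ord(c) + 1)):
--             total += 1
--         prev = c
--         i = j
--     return total
-- ===== Notes on version B (the rewrite author's own statement) =====
-- stated objective: alternative
-- what changed: A builds a frequency dict and then tests every position of the text against it; B sorts the lowered characters once and scans the sorted list run by run with two pointers, counting a run of length 1 whose adjacent runs are not the alphabet neighbours — no dict and no membership lookups at all.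
import Mathlib
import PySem

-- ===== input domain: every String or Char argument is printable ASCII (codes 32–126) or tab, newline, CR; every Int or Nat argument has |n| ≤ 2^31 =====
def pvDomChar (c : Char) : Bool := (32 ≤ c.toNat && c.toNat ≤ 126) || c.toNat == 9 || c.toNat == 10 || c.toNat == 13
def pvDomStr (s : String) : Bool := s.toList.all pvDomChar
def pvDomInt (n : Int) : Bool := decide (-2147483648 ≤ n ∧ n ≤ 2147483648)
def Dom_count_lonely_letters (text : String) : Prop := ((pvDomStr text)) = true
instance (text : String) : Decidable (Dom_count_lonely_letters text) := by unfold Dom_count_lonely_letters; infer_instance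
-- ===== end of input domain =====

-- B replaces A's frequency-dict + per-position pass by a different algorithm: sort the lowered
-- characters once, then scan the sorted list run by run — a run of length 1 is lonely unless the
-- adjacent runs are the alphabet neighbours (objective: alternative — no dict, no membership scans).

-- ===== PORT A =====
def count_lonely_letters (text : String) : Int :=
  let ts := PySem.Chars.lower text.toList
  -- for char in text: hashmap[char] = hashmap.get(char, 0) + 1
  let hashmap : PySem.Dict Char Int :=
    ts.foldl (fun d ch => d.insert ch (d.getD ch 0 + 1)) PySem.Dict.empty
  -- for i in range(len(text)): …  (text[i] is always in range, so pyGetD's default is never used;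
  -- hashmap[text[i]] never raises KeyError since every character was counted, so it is getD … 0;
  -- hashmap.get('', 0) for text[i] == 'a' is 0 — '' is never a key — so the else-branch value 0 is exact)
  (PySem.List.pyRange 0 (PySem.List.len ts)).foldl (fun output i =>
    let c := PySem.List.pyGetD ts i ' '
    if hashmap.getD c 0 > 1 ∨ ¬('a'.toNat ≤ c.toNat ∧ c.toNat ≤ 'z'.toNat) then output
    else
      -- Python's truthiness on the int left/right: "not left" ↔ left = 0
      let left : Int := if c ≠ 'a' then hashmap.getD (Char.ofNat (c.toNat - 1)) 0 else 0
      let right : Int := if c = 'z' then 0 else hashmap.getD (Char.ofNat (c.toNat + 1)) 0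
      if left = 0 ∧ right = 0 then output + 1 else output) 0

-- ===== PORT B =====
-- the outer while loop of Source B: recursion over the remaining suffix of the sorted list,
-- carrying prev (last char of the previous run) and the running total; the inner
-- 'advance j while equal' loop is the takeWhile/dropWhile split of the suffix.
-- prev = None / nxt = None are Option.none; Python's `prev != chr(…)` on None is True = (none ≠ some …).
def lonelyGo (prev : Option Char) (xs : List Char) (total : Int) : Int :=
  match xs with
  | [] => total
  | c :: rest =>
      let run := rest.takeWhile (fun d => d == c)
      let tail := rest.dropWhile (fun d => d == c)
      let nxt : Option Char := tail.head?
      let total' :=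
        if (1 + run.length = 1) ∧ ('a' ≤ c ∧ c ≤ 'z') ∧
           (c = 'a' ∨ prev ≠ some (Char.ofNat (c.toNat - 1))) ∧
           (c = 'z' ∨ nxt ≠ some (Char.ofNat (c.toNat + 1))) then total + 1 else total
      lonelyGo (some c) tail total'
termination_by xs.length
decreasing_by simp only [List.length_cons]; exact Nat.lt_succ_of_le (List.length_dropWhile_le (fun d => d == c) rest)

def count_lonely_letters_alt (text : String) : Int :=
  lonelyGo none (PySem.List.sorted (PySem.Chars.lower text.toList) (fun x => x) false) 0

-- ===== PRECONDITION & SPEC =====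
def Spec_count_lonely_letters (text : String) (out : Int) : Prop := out = count_lonely_letters_alt text
instance (text : String) (out : Int) : Decidable (Spec_count_lonely_letters text out) := by unfold Spec_count_lonely_letters; infer_instance

-- ===== CLAIM (what is proved, stated in full; the proofs are below) =====
def Claim_equal_count_lonely_letters : Prop := ∀ (text : String), Dom_count_lonely_letters text → Spec_count_lonely_letters text (count_lonely_letters text)

-- ===== LEMMAS AND PROOFS =====

-- the condition A's position loop tests, read off the counted multiplicities
def condA (ls : List Char) (c : Char) : Bool :=
  decide (¬(((ls.count c : Int)) > 1 ∨ ¬('a'.toNat ≤ c.toNat ∧ c.toNat ≤ 'z'.toNat)) ∧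
    (if c ≠ 'a' then ((ls.count (Char.ofNat (c.toNat - 1)) : Int)) else 0) = 0 ∧
    (if c = 'z' then (0 : Int) else ((ls.count (Char.ofNat (c.toNat + 1)) : Int))) = 0)

-- the per-character "lonely" condition, stated on multiplicities of ls
def condB (ls : List Char) (c : Char) : Bool :=
  decide (('a' ≤ c ∧ c ≤ 'z') ∧ ls.count c = 1 ∧
    ¬(c ≠ 'a' ∧ (Char.ofNat (c.toNat - 1)) ∈ ls) ∧
    ¬(c ≠ 'z' ∧ (Char.ofNat (c.toNat + 1)) ∈ ls))

lemma charle (a b : Char) : a ≤ b ↔ a.toNat ≤ b.toNat := by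
  rw [Char.le_def, UInt32.le_iff_toNat_le]; rfl

lemma charlt (a b : Char) : a < b ↔ a.toNat < b.toNat := by
  rw [Char.lt_def, UInt32.lt_iff_toNat_lt]; rfl

lemma char_ofNat_toNat {n : Nat} (h : n < 55296) : (Char.ofNat n).toNat = n := by
  simp [Char.ofNat, dif_pos (Or.inl h), Char.ofNatAux, Char.toNat]

lemma A_eq_countP (text : String) :
    count_lonely_letters text =
      ((PySem.Chars.lower text.toList).countP (condA (PySem.Chars.lower text.toList)) : Int) := by
  simp only [count_lonely_letters, PySem.Dict.foldl_insert_getD_add_one_eq_counter]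
  rw [PySem.List.foldl_pyRange_pyGetD _ ' '
      (fun output c =>
       if (PySem.Dict.counter (PySem.Chars.lower text.toList)).getD c 0 > 1 ∨
            ¬('a'.toNat ≤ c.toNat ∧ c.toNat ≤ 'z'.toNat) then output
       else
         if (if c ≠ 'a' then (PySem.Dict.counter (PySem.Chars.lower text.toList)).getD (Char.ofNat (c.toNat - 1)) 0 else 0) = 0 ∧
            (if c = 'z' then (0:Int) else (PySem.Dict.counter (PySem.Chars.lower text.toList)).getD (Char.ofNat (c.toNat + 1)) 0) = 0
         then output + 1 else output) 0 (le_refl 0)]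
  rw [Int.toNat_zero, List.drop_zero]
  rw [show (fun (output : Int) (c : Char) =>
       if (PySem.Dict.counter (PySem.Chars.lower text.toList)).getD c 0 > 1 ∨
            ¬('a'.toNat ≤ c.toNat ∧ c.toNat ≤ 'z'.toNat) then output
       else
         if (if c ≠ 'a' then (PySem.Dict.counter (PySem.Chars.lower text.toList)).getD (Char.ofNat (c.toNat - 1)) 0 else 0) = 0 ∧
            (if c = 'z' then (0:Int) else (PySem.Dict.counter (PySem.Chars.lower text.toList)).getD (Char.ofNat (c.toNat + 1)) 0) = 0
         then output + 1 else output)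
    = (fun (output : Int) (c : Char) => if condA (PySem.Chars.lower text.toList) c then output + 1 else output) from ?_]
  · rw [PySem.List.foldl_count_if]; ring
  · funext out c
    simp only [condA, PySem.Dict.getD_counter, decide_eq_true_eq]
    split_ifs with h1 h2 h3 <;> first | rfl | (exfalso; tauto)

lemma cond_agree (ls : List Char) (c : Char) (hc : c ∈ ls) : condA ls c = condB ls c := by
  have hpos : 0 < ls.count c := List.count_pos_iff.mpr hc
  unfold condA condB
  rw [decide_eq_decide]
  have h1 : (¬(((ls.count c : Int)) > 1 ∨ ¬('a'.toNat ≤ c.toNat ∧ c.toNat ≤ 'z'.toNat))) ↔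
      (('a' ≤ c ∧ c ≤ 'z') ∧ ls.count c = 1) := by
    rw [charle, charle]; push_cast; omega
  have h2 : ((if c ≠ 'a' then ((ls.count (Char.ofNat (c.toNat - 1)) : Int)) else 0) = 0) ↔
      ¬(c ≠ 'a' ∧ (Char.ofNat (c.toNat - 1)) ∈ ls) := by
    split_ifs with h
    · simp [h, List.count_eq_zero]
    · simp [h]
  have h3 : ((if c = 'z' then (0 : Int) else ((ls.count (Char.ofNat (c.toNat + 1)) : Int))) = 0) ↔
      ¬(c ≠ 'z' ∧ (Char.ofNat (c.toNat + 1)) ∈ ls) := by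
    split_ifs with h
    · simp [h]
    · simp [h, List.count_eq_zero]
  rw [h1, h2, h3]; tauto

-- sorted lists: an upper bound of all elements is a member iff it is the last element
lemma last_mem_iff (l : List Char) (hs : l.Pairwise (· ≤ ·)) (b : Char)
    (hb : ∀ e ∈ l, e ≤ b) : b ∈ l ↔ l.getLast? = some b := by
  induction l with
  | nil => simp
  | cons a t ih =>
    cases t with
    | nil =>
      simp only [List.mem_singleton, List.getLast?_singleton, Option.some_inj]
      constructor <;> (intro h; exact h.symm)
    | cons a' t' =>
      rw [List.getLast?_cons_cons]
      have hst : (a' :: t').Pairwise (· ≤ ·) := hs.of_cons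
      have hbt : ∀ e ∈ a' :: t', e ≤ b := fun e he => hb e (List.mem_cons_of_mem _ he)
      constructor
      · intro h
        rcases List.mem_cons.mp h with h | h
        · -- b = a; then a ≤ a' ≤ b = a forces a' = b, so b ∈ tail
          have h1 : a ≤ a' := (List.pairwise_cons.mp hs).1 a' (List.mem_cons_self)
          have h2 : a' ≤ b := hbt a' List.mem_cons_self
          have : a' = b := le_antisymm h2 (h ▸ h1)
          exact (ih hst hbt).mp (this ▸ List.mem_cons_self)
        · exact (ih hst hbt).mp h
      · intro h
        exact List.mem_cons_of_mem _ ((ih hst hbt).mpr h)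

-- sorted lists: a lower bound of all elements is a member iff it is the head
lemma head_mem_iff (l : List Char) (hs : l.Pairwise (· ≤ ·)) (b : Char)
    (hb : ∀ e ∈ l, b ≤ e) : b ∈ l ↔ l.head? = some b := by
  cases l with
  | nil => simp
  | cons a t =>
    simp only [List.head?_cons, Option.some_inj]
    constructor
    · intro h
      rcases List.mem_cons.mp h with h | h
      · exact h.symm
      · exact le_antisymm ((List.pairwise_cons.mp hs).1 b h) (hb a List.mem_cons_self)
    · intro h; exact h ▸ List.mem_cons_self

lemma getLast?_all_eq (c : Char) (run : List Char) (h : ∀ d ∈ run, d = c) :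
    (c :: run).getLast? = some c := by
  induction run with
  | nil => rfl
  | cons d t ih =>
    rw [List.getLast?_cons_cons]
    have hd : d = c := h d List.mem_cons_self
    subst hd
    exact ih (fun e he => h e (List.mem_cons_of_mem _ he))

lemma goB_spec : ∀ (n : Nat) (full xs pre : List Char) (total : Int), xs.length ≤ n →
    full.Pairwise (· ≤ ·) → full = pre ++ xs → (∀ e ∈ pre, ∀ d ∈ xs, e < d) →
    lonelyGo pre.getLast? xs total = total + ((xs.dedup.countP (condB full) : Nat) : Int) := by
  intro n
  induction n with
  | zero =>
    intro full xs pre total hlen _ _ _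
    have : xs = [] := List.eq_nil_of_length_eq_zero (Nat.le_zero.mp hlen)
    subst this; rw [lonelyGo.eq_def]; simp
  | succ n ih =>
    intro full xs pre total hlen hs hfull hinv
    cases xs with
    | nil => rw [lonelyGo.eq_def]; simp
    | cons c rest =>
      rw [lonelyGo.eq_def]
      dsimp only
      set run := rest.takeWhile (fun d => d == c) with hrun
      set tail := rest.dropWhile (fun d => d == c) with htail
      have hsplit : rest = run ++ tail := (List.takeWhile_append_dropWhile).symm
      have hrunc : ∀ d ∈ run, d = c := fun d hd => by
        simpa using List.mem_takeWhile_imp hd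
      -- sortedness of the suffix c :: rest
      have hxs : (c :: rest).Pairwise (· ≤ ·) := (List.pairwise_append.mp (hfull ▸ hs)).2.1
      have hcrest : ∀ d ∈ rest, c ≤ d := (List.pairwise_cons.mp hxs).1
      have hrestp : rest.Pairwise (· ≤ ·) := (List.pairwise_cons.mp hxs).2
      have htailp : tail.Pairwise (· ≤ ·) := hrestp.sublist (List.dropWhile_sublist _)
      have htailsub : ∀ d ∈ tail, d ∈ rest := fun d hd => (List.dropWhile_sublist _).subset hd
      -- every element of tail is strictly greater than c
      have hct : ∀ d ∈ tail, c < d := by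
        intro d hd
        rcases htl : tail with _ | ⟨hdd, tl⟩
        · rw [htl] at hd; cases hd
        · have hne : hdd ≠ c := by
            have := List.head?_dropWhile_not (fun d => d == c) rest
            rw [← htail, htl] at this; simpa using this
          have hge : c ≤ hdd := hcrest _ (htailsub _ (htl ▸ List.mem_cons_self))
          have hlt : c < hdd := lt_of_le_of_ne hge (Ne.symm hne)
          rw [htl] at hd
          rcases List.mem_cons.mp hd with h | h
          · exact h ▸ hlt
          · exact lt_of_lt_of_le hlt ((List.pairwise_cons.mp (htl ▸ htailp)).1 _ h)
      have hprec : ∀ e ∈ pre, e < c := fun e he => hinv e he c List.mem_cons_self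
      -- new prefix
      have hfull' : full = (pre ++ c :: run) ++ tail := by
        rw [hfull, hsplit]; simp
      have hinv' : ∀ e ∈ pre ++ c :: run, ∀ d ∈ tail, e < d := by
        intro e he d hd
        rcases List.mem_append.mp he with h | h
        · exact hinv e h d (List.mem_cons_of_mem _ ((hsplit ▸ List.mem_append_right run hd)))
        · have : e = c := by
            rcases List.mem_cons.mp h with h | h
            · exact h
            · exact hrunc e h
          exact this ▸ hct d hd
      have hlast : (pre ++ c :: run).getLast? = some c := by
        rw [List.getLast?_append_of_ne_nil _ (List.cons_ne_nil c run)]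
        exact getLast?_all_eq c run hrunc
      have hlen' : tail.length ≤ n := by
        have h := List.length_dropWhile_le (fun d => d == c) rest
        rw [← htail] at h
        simp only [List.length_cons] at hlen
        omega
      have IH : ∀ t : Int, lonelyGo (some c) tail t = t + ((tail.dedup.countP (condB full) : Nat) : Int) := by
        intro t
        have h := ih full tail (pre ++ c :: run) t hlen' hs hfull' hinv'
        rwa [hlast] at h
      rw [IH]
      -- count of c in full is 1 + run.length
      have hcount : full.count c = 1 + run.length := by
        rw [hfull, hsplit]
        have hpre0 : pre.count c = 0 := List.count_eq_zero.mpr (fun h => lt_irrefl c (hprec c h))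
        have htail0 : tail.count c = 0 := List.count_eq_zero.mpr (fun h => lt_irrefl c (hct c h))
        have hrunl : run.count c = run.length := List.count_eq_length.mpr
          (fun d hd => (hrunc d hd).symm)
        simp [List.count_append, hpre0, htail0, hrunl]
        omega
      -- the scanned condition equals condB full c
      have hcond : ((1 + run.length = 1) ∧ ('a' ≤ c ∧ c ≤ 'z') ∧
           (c = 'a' ∨ pre.getLast? ≠ some (Char.ofNat (c.toNat - 1))) ∧
           (c = 'z' ∨ tail.head? ≠ some (Char.ofNat (c.toNat + 1)))) ↔ condB full c = true := by
        simp only [condB, decide_eq_true_eq]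
        constructor
        · rintro ⟨h1, h2, h3, h4⟩
          refine ⟨h2, by omega, ?_, ?_⟩
          · rintro ⟨hca, hm⟩
            rcases h3 with h | h
            · exact hca h
            · -- cm1 ∈ full, derive pre.getLast? = some cm1
              apply h
              set cm1 := Char.ofNat (c.toNat - 1) with hcm1
              have hc97 : 97 ≤ c.toNat := (charle 'a' c).mp h2.1
              have hc122 : c.toNat ≤ 122 := (charle c 'z').mp h2.2
              have hcm1n : cm1.toNat = c.toNat - 1 := char_ofNat_toNat (by omega)
              have hcm1lt : cm1 < c := (charlt _ _).mpr (by omega)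
              have hmempre : cm1 ∈ pre := by
                rw [hfull] at hm
                rcases List.mem_append.mp hm with hmm | hmm
                · exact hmm
                · exfalso
                  rcases List.mem_cons.mp hmm with hmm | hmm
                  · exact lt_irrefl c (hmm ▸ hcm1lt)
                  · exact absurd (hcrest _ hmm) (not_le.mpr hcm1lt)
              have hprep : pre.Pairwise (· ≤ ·) := (List.pairwise_append.mp (hfull ▸ hs)).1
              have hub : ∀ e ∈ pre, e ≤ cm1 := by
                intro e he
                have := (charlt e c).mp (hprec e he)
                exact (charle e cm1).mpr (by omega)
              exact (last_mem_iff pre hprep cm1 hub).mp hmempre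
          · rintro ⟨hcz, hm⟩
            rcases h4 with h | h
            · exact hcz h
            · apply h
              set cp1 := Char.ofNat (c.toNat + 1) with hcp1
              have hc97 : 97 ≤ c.toNat := (charle 'a' c).mp h2.1
              have hc122 : c.toNat ≤ 122 := (charle c 'z').mp h2.2
              have hcp1n : cp1.toNat = c.toNat + 1 := char_ofNat_toNat (by omega)
              have hcp1gt : c < cp1 := (charlt _ _).mpr (by omega)
              have hmemtail : cp1 ∈ tail := by
                rw [hfull, hsplit] at hm
                rcases List.mem_append.mp hm with hmm | hmm
                · exact absurd (hprec _ hmm) (not_lt.mpr (le_of_lt hcp1gt))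
                · rcases List.mem_cons.mp hmm with hmm | hmm
                  · exact absurd hmm.symm (ne_of_lt hcp1gt)
                  · rcases List.mem_append.mp hmm with hmm | hmm
                    · exact absurd (hrunc _ hmm).symm (ne_of_lt hcp1gt)
                    · exact hmm
              have hlb : ∀ e ∈ tail, cp1 ≤ e := by
                intro e he
                have := (charlt c e).mp (hct e he)
                exact (charle cp1 e).mpr (by omega)
              exact (head_mem_iff tail htailp cp1 hlb).mp hmemtail
        · rintro ⟨h2, h1, h3, h4⟩
          refine ⟨by omega, h2, ?_, ?_⟩
          · by_cases hca : c = 'a'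
            · exact Or.inl hca
            · refine Or.inr (fun hsome => h3 ⟨hca, ?_⟩)
              rw [hfull]
              exact List.mem_append_left _ (List.mem_of_getLast? hsome)
          · by_cases hcz : c = 'z'
            · exact Or.inl hcz
            · refine Or.inr (fun hsome => h4 ⟨hcz, ?_⟩)
              rw [hfull, hsplit]
              have : Char.ofNat (c.toNat + 1) ∈ tail := List.mem_of_mem_head? hsome
              exact List.mem_append_right _ (List.mem_cons_of_mem _ (List.mem_append_right _ this))
      -- dedup of the suffix: c plus dedup of tail
      have hdedup : (c :: rest).dedup.Perm (c :: tail.dedup) := by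
        have hcnt : c ∉ tail.dedup := fun h =>
          lt_irrefl c (hct c (List.mem_dedup.mp h))
        rw [List.perm_ext_iff_of_nodup (List.nodup_dedup _) (List.nodup_cons.mpr ⟨hcnt, List.nodup_dedup _⟩)]
        intro a
        rw [List.mem_dedup, List.mem_cons, List.mem_cons, List.mem_dedup, hsplit, List.mem_append]
        constructor
        · rintro (h | h | h)
          · exact Or.inl h
          · exact Or.inl (hrunc a h)
          · exact Or.inr h
        · rintro (h | h)
          · exact Or.inl h
          · exact Or.inr (Or.inr h)
      rw [hdedup.countP_eq, List.countP_cons]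
      -- finish by case on the condition
      by_cases hc : condB full c = true
      · rw [if_pos (hcond.mpr hc)]
        simp [hc]; ring
      · rw [if_neg (fun h => hc (hcond.mp h))]
        simp only [hc]
        push_cast; simp

-- B as a countP over the distinct characters of the sorted list
lemma B_eq_countP (text : String) :
    count_lonely_letters_alt text =
      (((PySem.List.sorted (PySem.Chars.lower text.toList) (fun x => x) false).dedup.countP
        (condB (PySem.List.sorted (PySem.Chars.lower text.toList) (fun x => x) false)) : Nat) : Int) := by
  unfold count_lonely_letters_alt
  have hp : (PySem.List.sorted (PySem.Chars.lower text.toList) (fun x => x) false).Pairwise (· ≤ ·) := by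
    simpa using PySem.List.sorted_pairwise (PySem.Chars.lower text.toList) (fun x => x)
  have := goB_spec (PySem.List.sorted (PySem.Chars.lower text.toList) (fun x => x) false).length
    (PySem.List.sorted (PySem.Chars.lower text.toList) (fun x => x) false)
    (PySem.List.sorted (PySem.Chars.lower text.toList) (fun x => x) false) [] 0
    (le_refl _) hp rfl (by intro e he; cases he)
  simpa using this

-- among characters satisfying condB the count is 1, so countP over the list = countP over dedup
lemma countP_dedup_of_count_one (ls : List Char) (p : Char → Bool)
    (hone : ∀ x, p x = true → ls.count x = 1) :
    ls.countP p = ls.dedup.countP p := by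
  have hcount : ∀ x ∈ ls.dedup.filter p, ls.count x = 1 := by
    intro x hx
    exact hone x (List.mem_filter.mp hx).2
  rw [← List.sum_map_count_dedup_filter_eq_countP]
  rw [List.map_congr_left (fun x hx => hcount x hx)]
  simp [List.countP_eq_length_filter]

-- ===== VERDICT (by name: the statement is the Claim_ definition above) =====
theorem count_lonely_letters_spec : Claim_equal_count_lonely_letters := by
  intro text _
  unfold Spec_count_lonely_letters
  rw [A_eq_countP, B_eq_countP]
  set ls := PySem.Chars.lower text.toList with hls
  set ss := PySem.List.sorted ls (fun x => x) false with hss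
  have hperm : ss.Perm ls := PySem.List.sorted_perm ls (fun x => x) false
  have hsame : ∀ c, condB ls c = condB ss c := by
    intro c
    unfold condB
    rw [decide_eq_decide]
    rw [hperm.count_eq, hperm.mem_iff, hperm.mem_iff]
  have h1 : ls.countP (condA ls) = ls.countP (condB ss) := by
    apply List.countP_congr
    intro c hc
    rw [cond_agree ls c hc, hsame c]
  have h2 : ls.countP (condB ss) = ls.dedup.countP (condB ss) := by
    apply countP_dedup_of_count_one
    intro x hx
    simp only [condB, decide_eq_true_eq] at hx
    rw [← hperm.count_eq]
    exact hx.2.1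
  have h3 : ls.dedup.Perm ss.dedup := by
    rw [List.perm_ext_iff_of_nodup (List.nodup_dedup _) (List.nodup_dedup _)]
    intro a
    rw [List.mem_dedup, List.mem_dedup, hperm.mem_iff]
  rw [h1, h2, h3.countP_eq]
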